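-- pv_equiv track=rewrite | github.com/tehdi/advent-of-code-2015 | day10/main.py | merge_adjacent
-- ===== SOURCE A (Python) =====
-- def merge_adjacent(data: list[tuple[int, str]]) -> list[tuple[int, str]]:
--     last = data[0]
--     merged = []
--     for count, char in data[1:]:
--         if char == last[1]:
--             last = (last[0] + count, char)
--         else:
--             merged.append(last)
--             last = (count, char)
--     merged.append(last)
--     return merged
-- ===== SOURCE B (Python) =====
-- def merge_adjacent(data: list[tuple[int, str]]) -> list[tuple[int, str]]:
--     # Run-decomposition: peel off each maximal run of equal characters,
--     # summing its counts, instead of A's pending-accumulator-and-flush loop.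
--     merged = []
--     rest = data
--     while rest:
--         count, char = rest[0]
--         rest = rest[1:]
--         total = count
--         while rest and rest[0][1] == char:
--             total += rest[0][0]
--             rest = rest[1:]
--         merged.append((total, char))
--     return merged
-- ===== Notes on version B (the rewrite author's own statement) =====
-- stated objective: alternative
-- what changed: B peels off each maximal run of equal characters and emits (sum, char) per run, instead of A's running 'last' accumulator with flush-on-change.
import Mathlib
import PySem

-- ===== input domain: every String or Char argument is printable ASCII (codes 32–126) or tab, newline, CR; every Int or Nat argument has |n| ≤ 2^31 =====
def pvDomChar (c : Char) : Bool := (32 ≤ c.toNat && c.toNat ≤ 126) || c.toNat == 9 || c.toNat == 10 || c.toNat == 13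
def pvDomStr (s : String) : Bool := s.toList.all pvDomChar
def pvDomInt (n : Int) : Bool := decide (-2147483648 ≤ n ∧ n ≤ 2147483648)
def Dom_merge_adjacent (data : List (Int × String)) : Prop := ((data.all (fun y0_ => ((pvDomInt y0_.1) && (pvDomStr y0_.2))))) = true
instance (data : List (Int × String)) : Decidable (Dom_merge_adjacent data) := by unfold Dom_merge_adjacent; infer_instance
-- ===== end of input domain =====

-- B replaces A's pending-accumulator-and-flush loop by peeling maximal runs of equal
-- characters (alternative decomposition, no speed claim); Pre_ excludes [], where A raises IndexError.


-- ===== PORT A =====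
-- A's for-loop over data[1:] with state (last, merged); merged.append is ++ [·].
def mergeALoop (last : Int × String) (merged : List (Int × String)) :
    List (Int × String) → List (Int × String)
  | [] => merged ++ [last]
  | (count, char) :: rest =>
    if char == last.2 then mergeALoop (last.1 + count, char) merged rest
    else mergeALoop (count, char) (merged ++ [last]) rest

def merge_adjacent (data : List (Int × String)) : List (Int × String) :=
  match data with
  | [] => []            -- unreachable: data[0] raises IndexError, excluded by Pre_
  | h :: t => mergeALoop h [] t

-- ===== PORT B =====
-- B's inner while loop: consume the run of entries whose char equals `char`,
-- accumulating into `total`; returns (total, remaining list).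
def runScan (char : String) (total : Int) :
    List (Int × String) → Int × List (Int × String)
  | [] => (total, [])
  | (c, s) :: rest =>
    if s == char then runScan char (total + c) rest else (total, (c, s) :: rest)

theorem runScan_length_le (char : String) (total : Int) (l : List (Int × String)) :
    (runScan char total l).2.length ≤ l.length := by
  induction l generalizing total with
  | nil => simp [runScan]
  | cons h t ih =>
    obtain ⟨c, s⟩ := h
    simp only [runScan]
    split
    · exact le_trans (ih _) (Nat.le_succ _)
    · simp

-- B's outer while loop.
def merge_adjacent_alt (data : List (Int × String)) : List (Int × String) :=
  match data with
  | [] => []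
  | (count, char) :: rest =>
    let p := runScan char count rest
    (p.1, char) :: merge_adjacent_alt p.2
termination_by data.length
decreasing_by
  simpa using Nat.lt_succ_of_le (runScan_length_le char count rest)

-- ===== PRECONDITION & SPEC =====
-- A evaluates data[0]: it raises IndexError exactly on the empty list.
def Pre_merge_adjacent (data : List (Int × String)) : Prop := data ≠ []
instance (data : List (Int × String)) : Decidable (Pre_merge_adjacent data) := by
  unfold Pre_merge_adjacent; infer_instance

def pvWitness_merge_adjacent : (List (Int × String)) := [(3, "a"), (2, "a"), (1, "b")]

def Spec_merge_adjacent (data : List (Int × String)) (out : List (Int × String)) : Prop :=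
  out = merge_adjacent_alt data
instance (data : List (Int × String)) (out : List (Int × String)) :
    Decidable (Spec_merge_adjacent data out) := by unfold Spec_merge_adjacent; infer_instance

-- ===== CLAIM (what is proved, stated in full; the proofs are below) =====
def Claim_equal_merge_adjacent : Prop := ∀ (data : List (Int × String)),
  Dom_merge_adjacent data → Pre_merge_adjacent data →
  Spec_merge_adjacent data (merge_adjacent data)

-- ===== LEMMAS AND PROOFS =====

-- Key bridge: A's loop with pending pair (c, s) produces `merged ++` B's result on (c,s)::l.
theorem mergeALoop_eq_alt (l : List (Int × String)) :
    ∀ (c : Int) (s : String) (merged : List (Int × String)),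
    mergeALoop (c, s) merged l = merged ++ merge_adjacent_alt ((c, s) :: l) := by
  induction l with
  | nil =>
    intro c s merged
    simp [mergeALoop, merge_adjacent_alt, runScan]
  | cons h t ih =>
    intro c s merged
    obtain ⟨c2, s2⟩ := h
    by_cases hs : s2 == s
    · rw [show mergeALoop (c, s) merged ((c2, s2) :: t) = mergeALoop (c + c2, s2) merged t by
        simp [mergeALoop, hs]]
      have hseq : s2 = s := by simpa using hs
      subst hseq
      rw [ih]
      congr 1
      simp [merge_adjacent_alt, runScan]
    · rw [show mergeALoop (c, s) merged ((c2, s2) :: t) =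
          mergeALoop (c2, s2) (merged ++ [(c, s)]) t by simp [mergeALoop, hs]]
      rw [ih]
      rw [show merge_adjacent_alt ((c, s) :: (c2, s2) :: t) =
          (c, s) :: merge_adjacent_alt ((c2, s2) :: t) by
        simp [merge_adjacent_alt, runScan, hs]]
      simp

-- ===== VERDICT (by name: the statement is the Claim_ definition above) =====
theorem merge_adjacent_spec : Claim_equal_merge_adjacent := by
  intro data _ hpre
  match data with
  | [] => exact absurd rfl hpre
  | (c, s) :: t =>
    show merge_adjacent ((c, s) :: t) = merge_adjacent_alt ((c, s) :: t)
    rw [show merge_adjacent ((c, s) :: t) = mergeALoop (c, s) [] t from rfl]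
    simpa using mergeALoop_eq_alt t c s []
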